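-- pv_equiv track=rewrite | github.com/Espresso0org/Generator | Main.py | calculate_address
-- ===== SOURCE A (Python) =====
-- def calculate_address(position):
--     characters = "123456789ABCDEFGHJKLMNPQRSTUVWXYZabcdefghijkmnopqrstuvwxyz"
--     base = len(characters)
--     address = ""
--
--     while position > 0:
--         position, remainder = divmod(position, base)
--         address = characters[remainder] + address
--
--     return address
-- ===== SOURCE B (Python) =====
-- def calculate_address(position):
--     characters = "123456789ABCDEFGHJKLMNPQRSTUVWXYZabcdefghijkmnopqrstuvwxyz"
--     if position <= 0:
--         return ""
--     return calculate_address(position // 58) + characters[position % 58]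
-- ===== Notes on version B (the rewrite author's own statement) =====
-- stated objective: alternative
-- what changed: Replaces the iterative while-loop that prepends digits onto an accumulator string with a direct recursion on position // base that appends each digit after the recursive call.
import Mathlib
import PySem

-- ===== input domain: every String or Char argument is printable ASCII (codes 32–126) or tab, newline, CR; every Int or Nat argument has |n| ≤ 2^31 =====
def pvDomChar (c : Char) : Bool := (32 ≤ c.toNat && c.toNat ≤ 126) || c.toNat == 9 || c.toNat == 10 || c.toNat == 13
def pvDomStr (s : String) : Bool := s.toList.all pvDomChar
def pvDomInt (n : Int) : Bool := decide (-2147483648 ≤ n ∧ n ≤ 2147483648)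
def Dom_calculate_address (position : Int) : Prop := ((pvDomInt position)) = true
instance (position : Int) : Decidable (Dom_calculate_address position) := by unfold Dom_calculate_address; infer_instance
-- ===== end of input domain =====

-- B replaces A's while-loop with prepend-accumulator by a direct recursion on position // base
-- that appends each digit after the recursive call; same values, no speed claim.

-- termination helper (cited by both ports' decreasing_by)
theorem pv_floordiv58_lt (p : Int) (hp : 0 < p) :
    (PySem.Int.floordiv p 58).toNat < p.toNat := by
  rw [PySem.Int.floordiv_eq_ediv_of_pos (by norm_num : (0:Int) < 58)]
  omega

-- ===== PORT A =====
def pvCharsA : List Char := "123456789ABCDEFGHJKLMNPQRSTUVWXYZabcdefghijkmnopqrstuvwxyz".toList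

-- the while loop; characters[remainder] is always in range (0 ≤ position % 58 < 58), so pyGetD is exact
def pvLoopA (position : Int) (address : List Char) : List Char :=
  if position > 0 then
    let q := PySem.Int.floordiv position pvCharsA.length
    let r := PySem.Int.mod position pvCharsA.length
    pvLoopA q (PySem.List.pyGetD pvCharsA r ' ' :: address)
  else address
termination_by position.toNat
decreasing_by exact pv_floordiv58_lt position (by omega)

def calculate_address (position : Int) : String := String.ofList (pvLoopA position [])

-- ===== PORT B =====
def pvCharsB : List Char := "123456789ABCDEFGHJKLMNPQRSTUVWXYZabcdefghijkmnopqrstuvwxyz".toList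

def pvAltB (position : Int) : List Char :=
  if position ≤ 0 then []
  else pvAltB (PySem.Int.floordiv position 58) ++ [PySem.List.pyGetD pvCharsB (PySem.Int.mod position 58) ' ']
termination_by position.toNat
decreasing_by exact pv_floordiv58_lt position (by omega)

def calculate_address_alt (position : Int) : String := String.ofList (pvAltB position)

-- ===== PRECONDITION & SPEC =====
def Spec_calculate_address (position : Int) (out : String) : Prop := out = calculate_address_alt position
instance (position : Int) (out : String) : Decidable (Spec_calculate_address position out) := by unfold Spec_calculate_address; infer_instance

-- ===== CLAIM (what is proved, stated in full; the proofs are below) =====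
def Claim_equal_calculate_address : Prop := ∀ (position : Int), Dom_calculate_address position → Spec_calculate_address position (calculate_address position)

-- ===== LEMMAS AND PROOFS =====
theorem pv_chars_eq : pvCharsA = pvCharsB := rfl



theorem pv_loop_eq_alt (n : Nat) : ∀ (p : Int), p.toNat ≤ n → ∀ (acc : List Char),
    pvLoopA p acc = pvAltB p ++ acc := by
  induction n with
  | zero =>
    intro p hp acc
    have hple : p ≤ 0 := by omega
    rw [pvLoopA, pvAltB]
    simp [not_lt.mpr hple, hple]
  | succ n ih =>
    intro p hp acc
    rw [pvLoopA, pvAltB]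
    by_cases h : 0 < p
    · have hlen : ((pvCharsB.length : Int)) = 58 := by decide
      simp only [h, if_pos, if_neg (by omega : ¬ p ≤ 0), pv_chars_eq, hlen]
      rw [ih _ (by have := pv_floordiv58_lt p h; omega)]
      simp
    · simp [h, (by omega : p ≤ 0)]

-- ===== VERDICT (by name: the statement is the Claim_ definition above) =====
theorem calculate_address_spec : Claim_equal_calculate_address := by
  intro p _
  unfold Spec_calculate_address calculate_address calculate_address_alt
  rw [pv_loop_eq_alt p.toNat p (le_refl _), List.append_nil]
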